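-- pv_equiv track=rewrite | github.com/TheAltOfDelayedMotion/Python | The CT Project/Modules/lib_tta_3D.py | identifyKeywords
-- ===== SOURCE A (Python) =====
-- def identifyKeywords(keywords): #keywords should be a dictionary with definitions of words with their vector magnitudes & direction
--     neutral_terms = []
--     identifiers = []
--
--     n_iteration = 0
--     index_of_last_neutral = 0
--     for keyword in keywords:
--         n_iteration += 1
--         if keywords[keyword][0] == 0: #if it does not have a magnitude
--             if n_iteration-index_of_last_neutral == 1 and index_of_last_neutral!=0: #if the previous word is also neutral (no magnitude)
--                 combined = neutral_terms[-1] + " " + keyword #last word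
--                 neutral_terms.pop()
--                 neutral_terms.append(combined)
--                 index_of_last_neutral = n_iteration
--
--             else:
--                 neutral_terms.append(keyword)
--                 index_of_last_neutral = n_iteration
--
--         else: #if it is a keyword!
--             identifiers.append(keyword)
--
--     return identifiers, neutral_terms
-- ===== SOURCE B (Python) =====
-- def identifyKeywords(keywords):
--     # Run-grouping: split the key stream into maximal runs of equal neutrality,
--     # join each neutral run once, extend identifiers with each non-neutral run.
--     identifiers = []
--     neutral_terms = []
--     keys = list(keywords)
--     n = len(keys)
--     i = 0
--     while i < n:
--         flag = keywords[keys[i]][0] == 0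
--         j = i + 1
--         while j < n and (keywords[keys[j]][0] == 0) == flag:
--             j += 1
--         if flag:
--             neutral_terms.append(" ".join(keys[i:j]))
--         else:
--             identifiers.extend(keys[i:j])
--         i = j
--     return identifiers, neutral_terms
-- ===== Notes on version B (the rewrite author's own statement) =====
-- stated objective: idiomatic
-- what changed: Replaces the counter/last-neutral-index bookkeeping with incremental pop-and-reconcatenate by explicit maximal-run grouping over the key stream with one ' '.join per neutral run.
-- outside the precondition, e.g. on identifyKeywords({'a': []}): A raises IndexError, B raises IndexError
import Mathlib
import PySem

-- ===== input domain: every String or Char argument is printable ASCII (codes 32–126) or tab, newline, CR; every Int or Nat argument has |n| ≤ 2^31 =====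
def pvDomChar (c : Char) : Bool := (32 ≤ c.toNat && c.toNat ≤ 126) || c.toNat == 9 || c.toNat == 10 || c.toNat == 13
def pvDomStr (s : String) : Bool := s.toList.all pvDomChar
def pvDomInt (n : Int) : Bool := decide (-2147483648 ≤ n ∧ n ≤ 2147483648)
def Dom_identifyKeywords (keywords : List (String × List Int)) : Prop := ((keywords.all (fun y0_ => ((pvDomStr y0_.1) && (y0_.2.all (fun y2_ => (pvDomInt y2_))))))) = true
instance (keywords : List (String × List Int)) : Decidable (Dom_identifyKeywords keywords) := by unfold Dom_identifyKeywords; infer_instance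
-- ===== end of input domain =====

-- B replaces A's counter/last-neutral-index bookkeeping (with pop-and-reconcatenate of the
-- last neutral term) by explicit maximal-run grouping with one join per neutral run (idiomatic).

-- ===== PORT A =====
-- A iterates over the dict's keys in insertion order and looks each key up again;
-- `keywords[keyword][0]` raises (KeyError/IndexError) exactly where the bind/pyGet? chain is
-- none — the `.getD 1` default is never claimed (those inputs are outside Pre_).
def identifyKeywords (keywords : List (String × List Int)) : List String × List String :=
  let st := (keywords.map Prod.fst).foldl
    (fun (st : Int × Int × List String × List String) keyword =>
      let n := st.1 + 1                  -- n_iteration += 1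
      let last := st.2.1
      let ids := st.2.2.1
      let neu := st.2.2.2
      if (((PySem.Dict.mk keywords).get? keyword).bind (fun v => PySem.List.pyGet? v 0)).getD 1 == 0 then
        if n - last == 1 && last != 0 then
          let combined := (PySem.List.pyGet? neu (-1)).getD "" ++ " " ++ keyword
          (n, n, ids, neu.dropLast ++ [combined])   -- neutral_terms.pop(); neutral_terms.append(combined)
        else
          (n, n, ids, neu ++ [keyword])
      else
        (n, last, ids ++ [keyword], neu))
    (0, 0, [], [])
  (st.2.2.1, st.2.2.2)

-- ===== PORT B =====
-- keywords[k][0] == 0, exactly as in A (same lookup, same default outside Pre_)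
def pvFlag (keywords : List (String × List Int)) (k : String) : Bool :=
  (((PySem.Dict.mk keywords).get? k).bind (fun v => PySem.List.pyGet? v 0)).getD 1 == 0

-- the while-loop of Source B: consume one maximal run per step (inner while = takeWhile/dropWhile)
def pvRuns (keywords : List (String × List Int)) : List String → List String × List String → List String × List String
  | [], acc => acc
  | k :: rest, (ids, neu) =>
    let flag := pvFlag keywords k
    let run := k :: rest.takeWhile (fun k' => pvFlag keywords k' == flag)
    let rest' := rest.dropWhile (fun k' => pvFlag keywords k' == flag)
    if flag then pvRuns keywords rest' (ids, neu ++ [PySem.Str.join " " run])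
    else pvRuns keywords rest' (ids ++ run, neu)
  termination_by keys _ => keys.length
  decreasing_by
    all_goals
      exact Nat.lt_succ_of_le (List.length_dropWhile_le _ _)

def identifyKeywords_alt (keywords : List (String × List Int)) : List String × List String :=
  pvRuns keywords (keywords.map Prod.fst) ([], [])

-- ===== PRECONDITION & SPEC =====
-- Pre_ excludes (a) duplicate keys, impossible for the Python dict argument this assoc list
-- encodes, and (b) any keyword whose magnitude list has no first element, where `keywords[keyword][0]` raises IndexError
-- in A (and B raises there too).
def Pre_identifyKeywords (keywords : List (String × List Int)) : Prop :=
  (keywords.map Prod.fst).Nodup ∧ ∀ p ∈ keywords, p.2 ≠ []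
instance (keywords : List (String × List Int)) : Decidable (Pre_identifyKeywords keywords) := by
  unfold Pre_identifyKeywords; infer_instance

def pvWitness_identifyKeywords : (List (String × List Int)) :=
  [("a", [1]), ("b", [0]), ("c", [0])]

def Spec_identifyKeywords (keywords : List (String × List Int)) (out : List String × List String) : Prop := out = identifyKeywords_alt keywords
instance (keywords : List (String × List Int)) (out : List String × List String) : Decidable (Spec_identifyKeywords keywords out) := by unfold Spec_identifyKeywords; infer_instance

-- ===== CLAIM (what is proved, stated in full; the proofs are below) =====
def Claim_equal_identifyKeywords : Prop := ∀ (keywords : List (String × List Int)), Dom_identifyKeywords keywords → Pre_identifyKeywords keywords → Spec_identifyKeywords keywords (identifyKeywords keywords)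


-- ===== LEMMAS AND PROOFS =====

-- A's loop body with the neutrality test abstracted into f
def pvStep (f : String → Bool) (st : Int × Int × List String × List String) (keyword : String) :
    Int × Int × List String × List String :=
  let n := st.1 + 1
  let last := st.2.1
  let ids := st.2.2.1
  let neu := st.2.2.2
  if f keyword then
    if n - last == 1 && last != 0 then
      let combined := (PySem.List.pyGet? neu (-1)).getD "" ++ " " ++ keyword
      (n, n, ids, neu.dropLast ++ [combined])
    else
      (n, n, ids, neu ++ [keyword])
  else
    (n, last, ids ++ [keyword], neu)

-- intermediate form: A's loop with the two counters replaced by the single flag they encode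
def pvCanon (f : String → Bool) : List String → Bool → List String → List String → List String × List String
  | [], _, ids, neu => (ids, neu)
  | k :: ks, prev, ids, neu =>
    if f k then
      if prev then
        pvCanon f ks true ids (neu.dropLast ++ [(PySem.List.pyGet? neu (-1)).getD "" ++ " " ++ k])
      else
        pvCanon f ks true ids (neu ++ [k])
    else
      pvCanon f ks false (ids ++ [k]) neu

lemma pvFold_eq_canon (f : String → Bool) (keys : List String) :
    ∀ (n last : Int) (ids neu : List String), 0 ≤ last → last ≤ n →
      (keys.foldl (pvStep f) (n, last, ids, neu)).2.2 =
        pvCanon f keys (last == n && n != 0) ids neu := by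
  induction keys with
  | nil => intro n last ids neu _ _; rfl
  | cons k ks ih =>
    intro n last ids neu h0 h1
    simp only [List.foldl_cons, pvStep, pvCanon]
    cases hf : f k with
    | false =>
      simp only [Bool.false_eq_true, if_false]
      rw [ih (n+1) last _ neu (by omega) (by omega)]
      have h : (last == n+1 && ((n:Int)+1 != 0)) = false := by
        simp only [Bool.and_eq_false_iff, beq_eq_false_iff_ne, ne_eq]
        left; omega
      rw [h]
    | true =>
      simp only [if_true]
      cases hc : ((n : Int) + 1 - last == 1 && last != 0) with
      | true =>
        have hprev : (last == n && n != 0) = true := by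
          simp only [Bool.and_eq_true, beq_iff_eq, bne_iff_ne, ne_eq] at hc ⊢
          omega
        simp only [if_true, hprev]
        rw [ih (n+1) (n+1) ids _ (by omega) (by omega)]
        have h : ((n:Int)+1 == n+1 && ((n:Int)+1 != 0)) = true := by
          rw [Bool.and_eq_true, beq_iff_eq, bne_iff_ne]; exact ⟨rfl, by omega⟩
        rw [h]
      | false =>
        have hprev : (last == n && n != 0) = false := by
          simp only [Bool.and_eq_false_iff, beq_eq_false_iff_ne, bne_eq_false_iff_eq, ne_eq] at hc ⊢
          omega
        simp only [Bool.false_eq_true, if_false, hprev]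
        rw [ih (n+1) (n+1) ids _ (by omega) (by omega)]
        have h : ((n:Int)+1 == n+1 && ((n:Int)+1 != 0)) = true := by
          rw [Bool.and_eq_true, beq_iff_eq, bne_iff_ne]; exact ⟨rfl, by omega⟩
        rw [h]

lemma pvJoin_absorb (a b : String) (l : List String) :
    PySem.Str.join " " (a :: b :: l) = PySem.Str.join " " ((a ++ " " ++ b) :: l) := by
  simp only [PySem.Str.join, List.map_cons]
  congr 1
  have hab : (a ++ " " ++ b).toList = a.toList ++ [' '] ++ b.toList := by simp
  rw [hab]
  cases l with
  | nil => simp [PySem.Chars.join_singleton, PySem.Chars.join_cons_cons]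
  | cons c cs =>
    simp only [List.map_cons]
    rw [PySem.Chars.join_cons_cons, PySem.Chars.join_cons_cons]
    simp [PySem.Chars.join_cons_cons]

lemma pvJoin_singleton (w : String) : PySem.Str.join " " [w] = w := by
  simp only [PySem.Str.join, List.map, PySem.Chars.join_singleton]
  exact String.ofList_toList

lemma pvLastGet (neu : List String) (w : String) :
    (PySem.List.pyGet? (neu ++ [w]) (-1)).getD "" = w := by
  simp [PySem.List.pyGet?, PySem.List.pyIdx?]

lemma pvCanon_neutral_run (f : String → Bool) (ns : List String) :
    ∀ (rest : List String) (w : String) (ids neu : List String),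
      (∀ x ∈ ns, f x = true) →
      pvCanon f (ns ++ rest) true ids (neu ++ [w]) =
        pvCanon f rest true ids (neu ++ [PySem.Str.join " " (w :: ns)]) := by
  induction ns with
  | nil => intro rest w ids neu _; rw [pvJoin_singleton]; rfl
  | cons x ns ih =>
    intro rest w ids neu hall
    have hx : f x = true := hall x (by simp)
    simp only [List.cons_append, pvCanon, hx, if_true, List.dropLast_concat, pvLastGet]
    rw [ih rest (w ++ " " ++ x) ids neu (fun y hy => hall y (by simp [hy]))]
    rw [pvJoin_absorb]

lemma pvCanon_plain_run (f : String → Bool) (ns : List String) :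
    ∀ (rest ids neu : List String),
      (∀ x ∈ ns, f x = false) →
      pvCanon f (ns ++ rest) false ids neu = pvCanon f rest false (ids ++ ns) neu := by
  induction ns with
  | nil => intro rest ids neu _; simp
  | cons x ns ih =>
    intro rest ids neu hall
    have hx : f x = false := hall x (by simp)
    simp only [List.cons_append, pvCanon, hx, Bool.false_eq_true, if_false]
    rw [ih rest (ids ++ [x]) neu (fun y hy => hall y (by simp [hy]))]
    simp

lemma pvCanon_prev_irrelevant (f : String → Bool) (rest ids neu : List String)
    (h : rest = [] ∨ ∃ k ks, rest = k :: ks ∧ f k = false) :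
    pvCanon f rest true ids neu = pvCanon f rest false ids neu := by
  rcases h with h | ⟨k, ks, rfl, hk⟩
  · subst h; rfl
  · simp [pvCanon, hk]

lemma pvDropHead (p : String → Bool) (ks : List String) (d : String) (ds : List String)
    (hdw : ks.dropWhile p = d :: ds) : p d = false := by
  have hne : ks.dropWhile p ≠ [] := by rw [hdw]; simp
  have h2 := List.head_dropWhile_not p hne
  simp only [hdw, List.head_cons] at h2
  exact h2

lemma pvCanon_eq_runs (keywords : List (String × List Int)) :
    ∀ (keys ids neu : List String),
      pvCanon (pvFlag keywords) keys false ids neu = pvRuns keywords keys (ids, neu) := by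
  intro keys
  induction hn : keys.length using Nat.strong_induction_on generalizing keys with
  | _ n ih =>
    cases keys with
    | nil => intro ids neu; rw [pvRuns]; rfl
    | cons k ks =>
      intro ids neu
      have hlen : ∀ (p : String → Bool), (ks.dropWhile p).length < n := by
        intro p
        calc (ks.dropWhile p).length ≤ ks.length := List.length_dropWhile_le _ _
          _ < n := by simp at hn; omega
      cases hf : pvFlag keywords k with
      | true =>
        have hstep : pvCanon (pvFlag keywords) (k :: ks) false ids neu
            = pvCanon (pvFlag keywords) ks true ids (neu ++ [k]) := by
          simp [pvCanon, hf]
        rw [hstep]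
        have hsplit : ks = ks.takeWhile (fun k' => pvFlag keywords k' == true)
            ++ ks.dropWhile (fun k' => pvFlag keywords k' == true) :=
          (List.takeWhile_append_dropWhile).symm
        conv_lhs => rw [hsplit]
        rw [pvCanon_neutral_run _ _ _ _ _ _
          (fun x hx => by simpa using List.mem_takeWhile_imp hx)]
        rw [pvCanon_prev_irrelevant]
        · rw [ih _ (hlen _) _ rfl]
          conv_rhs => rw [pvRuns]
          simp only [hf, if_true]
        · cases hdw : ks.dropWhile (fun k' => pvFlag keywords k' == true) with
          | nil => left; rfl
          | cons d ds =>
            right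
            exact ⟨d, ds, rfl, by simpa using pvDropHead _ _ _ _ hdw⟩
      | false =>
        have hstep : pvCanon (pvFlag keywords) (k :: ks) false ids neu
            = pvCanon (pvFlag keywords) ks false (ids ++ [k]) neu := by
          simp [pvCanon, hf]
        rw [hstep]
        have hsplit : ks = ks.takeWhile (fun k' => pvFlag keywords k' == false)
            ++ ks.dropWhile (fun k' => pvFlag keywords k' == false) :=
          (List.takeWhile_append_dropWhile).symm
        conv_lhs => rw [hsplit]
        rw [pvCanon_plain_run _ _ _ _ _
          (fun x hx => by simpa using List.mem_takeWhile_imp hx)]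
        rw [ih _ (hlen _) _ rfl]
        conv_rhs => rw [pvRuns]
        simp only [hf, Bool.false_eq_true, if_false]
        congr 1
        simp

-- ===== VERDICT (by name: the statement is the Claim_ definition above) =====
theorem identifyKeywords_spec : Claim_equal_identifyKeywords := by
  intro keywords _ _
  unfold Spec_identifyKeywords identifyKeywords identifyKeywords_alt
  have h := pvFold_eq_canon (pvFlag keywords) (keywords.map Prod.fst) 0 0 [] []
    (le_refl 0) (le_refl 0)
  rw [show ((0 : Int) == 0 && (0 : Int) != 0) = false by decide] at h
  rw [pvCanon_eq_runs] at h
  exact h ▸ rfl
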